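-- pv_equiv track=rewrite | github.com/Archiwum-WI-N1-20-21/ZUT-informatyka | Semestr 6/SI/lab5.py | fillGene
-- ===== SOURCE A (Python) =====
-- def fillGene(f,p):
--     for _, a in enumerate(p):
--         if a not in f:
--             for ib, b in enumerate(f):
--                 if b == 0 :
--                     f[ib] = a
--                     break
--
--     return f
-- ===== SOURCE B (Python) =====
-- def fillGene(f, p):
--     seen = set(f)
--     vals = []
--     for a in p:
--         if a not in seen:
--             vals.append(a)
--             seen.add(a)
--     zeros = [i for i, x in enumerate(f) if x == 0]
--     for i, v in zip(zeros, vals):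
--         f[i] = v
--     return f
-- ===== Notes on version B (the rewrite author's own statement) =====
-- stated objective: faster
-- what changed: Replaces A's interleaved loop (per element of p: a membership scan of the mutating list f plus an inner scan for the first zero) with three independent linear passes: a seen-set filter over p collecting the values to place, a precomputed list of zero indices of f, and a zip assignment.
import Mathlib
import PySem

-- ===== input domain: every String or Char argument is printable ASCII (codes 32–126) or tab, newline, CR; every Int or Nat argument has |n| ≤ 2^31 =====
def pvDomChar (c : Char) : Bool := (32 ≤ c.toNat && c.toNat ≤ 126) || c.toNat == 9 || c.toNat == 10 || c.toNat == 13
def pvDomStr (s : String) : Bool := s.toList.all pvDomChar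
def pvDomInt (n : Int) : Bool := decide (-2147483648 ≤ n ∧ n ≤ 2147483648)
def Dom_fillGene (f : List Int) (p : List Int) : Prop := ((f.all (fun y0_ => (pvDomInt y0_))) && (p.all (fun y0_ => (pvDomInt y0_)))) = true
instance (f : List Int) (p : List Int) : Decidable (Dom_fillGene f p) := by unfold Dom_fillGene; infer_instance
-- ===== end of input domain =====

-- B replaces A's nested scans by three linear passes (seen-set filter of p, zero-index list, zip
-- assignment); both Pythons mutate f in place the same way, and the equivalence is about the return value.

-- ===== PORT A =====
-- A's inner loop: scan f for the first 0, replace it with a, break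
def placeZero (f : List Int) (a : Int) : List Int :=
  match f with
  | [] => []
  | b :: bs => if b = 0 then a :: bs else b :: placeZero bs a

def fillGene (f : List Int) (p : List Int) : List Int :=
  p.foldl (fun g a => if a ∈ g then g else placeZero g a) f

-- ===== PORT B =====
-- [i for i, x in enumerate(f) if x == 0]
def zerosIdx (f : List Int) (i : Nat) : List Nat :=
  match f with
  | [] => []
  | x :: xs => if x = 0 then i :: zerosIdx xs (i + 1) else zerosIdx xs (i + 1)

def fillGene_alt (f : List Int) (p : List Int) : List Int :=
  let sv := p.foldl (fun sv a =>
              if PySem.Set.contains sv.1 a then sv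
              else (PySem.Set.add sv.1 a, sv.2 ++ [a]))
            ((PySem.Set.ofList f : PySem.Set Int), ([] : List Int))
  let zeros := zerosIdx f 0
  (zeros.zip sv.2).foldl (fun g iv => g.set iv.1 iv.2) f

-- ===== PRECONDITION & SPEC =====
def Spec_fillGene (f : List Int) (p : List Int) (out : List Int) : Prop := out = fillGene_alt f p
instance (f : List Int) (p : List Int) (out : List Int) : Decidable (Spec_fillGene f p out) := by unfold Spec_fillGene; infer_instance

-- ===== CLAIM (what is proved, stated in full; the proofs are below) =====
def Claim_equal_fillGene : Prop := ∀ (f : List Int) (p : List Int), Dom_fillGene f p → Spec_fillGene f p (fillGene f p)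

-- ===== LEMMAS AND PROOFS =====

-- recursion form of B's collecting pass
def collectR (s : PySem.Set Int) : List Int → List Int
  | [] => []
  | a :: p => if PySem.Set.contains s a then collectR s p
              else a :: collectR (PySem.Set.add s a) p

lemma collect_bridge (p : List Int) (s : PySem.Set Int) (acc : List Int) :
    (p.foldl (fun sv a =>
        if PySem.Set.contains sv.1 a then sv
        else (PySem.Set.add sv.1 a, sv.2 ++ [a])) (s, acc)).2
      = acc ++ collectR s p := by
  induction p generalizing s acc with
  | nil => simp [collectR]
  | cons a p ih =>
      by_cases h : PySem.Set.contains s a = true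
      · simp only [List.foldl, collectR, if_pos h]
        exact ih s acc
      · simp only [List.foldl, collectR, if_neg h]
        rw [ih (PySem.Set.add s a) (acc ++ [a])]
        simp

lemma collectR_not_mem (p : List Int) (s : PySem.Set Int) (a : Int)
    (h : a ∈ collectR s p) : a ∉ (s : List Int) := by
  induction p generalizing s with
  | nil => simp [collectR] at h
  | cons b p ih =>
      by_cases hb : PySem.Set.contains s b = true
      · simp only [collectR, if_pos hb] at h
        exact ih _ h
      · simp only [collectR, if_neg hb] at h
        rcases List.mem_cons.mp h with h | h
        · subst h
          exact fun hm => hb ((PySem.Set.contains_iff _ _).mpr hm)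
        · intro hm
          exact ih _ h ((PySem.Set.mem_add _ _ _).mpr (Or.inl hm))

lemma placeZero_nozero (f : List Int) (a : Int) (h : (0 : Int) ∉ f) :
    placeZero f a = f := by
  induction f with
  | nil => rfl
  | cons b bs ih =>
      simp at h
      simp [placeZero, Ne.symm h.1, ih h.2]

lemma mem_placeZero (f : List Int) (a x : Int) (h : x ∈ placeZero f a) :
    x ∈ f ∨ x = a := by
  induction f with
  | nil => simp [placeZero] at h
  | cons b bs ih =>
      by_cases hb : b = 0
      · simp [placeZero, hb] at h
        rcases h with h | h
        · exact Or.inr h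
        · exact Or.inl (by simp [h])
      · simp [placeZero, hb] at h
        rcases h with h | h
        · exact Or.inl (by simp [h])
        · rcases ih h with h' | h'
          · exact Or.inl (by simp [h'])
          · exact Or.inr h'

lemma self_mem_placeZero (f : List Int) (a : Int) (h : (0 : Int) ∈ f) :
    a ∈ placeZero f a := by
  induction f with
  | nil => simp at h
  | cons b bs ih =>
      by_cases hb : b = 0
      · simp [placeZero, hb]
      · simp [placeZero, hb]
        simp [Ne.symm hb] at h
        exact Or.inr (ih h)

lemma mem_placeZero_of_ne (f : List Int) (a x : Int) (hx : x ∈ f) (hne : x ≠ 0) :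
    x ∈ placeZero f a := by
  induction f with
  | nil => simp at hx
  | cons b bs ih =>
      by_cases hb : b = 0
      · simp [placeZero, hb]
        simp [hb] at hx
        rcases hx with h | h
        · exact absurd h hne
        · exact Or.inr h
      · simp [placeZero, hb]
        simp at hx
        rcases hx with h | h
        · exact Or.inl h
        · exact Or.inr (ih h)

lemma foldl_placeZero_nozero (vs : List Int) (f : List Int) (h : (0 : Int) ∉ f) :
    vs.foldl placeZero f = f := by
  induction vs with
  | nil => rfl
  | cons v vs ih => simp [List.foldl, placeZero_nozero f v h, ih]

lemma foldl_placeZero_cons (vs : List Int) (v : Int) (hv : v ≠ 0) (xs : List Int) :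
    vs.foldl placeZero (v :: xs) = v :: vs.foldl placeZero xs := by
  induction vs generalizing xs with
  | nil => rfl
  | cons a vs ih => simp [List.foldl, placeZero, hv, ih]

lemma zerosIdx_shift (xs : List Int) (k : Nat) :
    zerosIdx xs (k + 1) = (zerosIdx xs k).map (· + 1) := by
  induction xs generalizing k with
  | nil => rfl
  | cons x xs ih =>
      by_cases hx : x = 0 <;> simp [zerosIdx, hx, ih]

lemma foldl_set_map_succ (is : List Nat) (vs : List Int) (x : Int) (xs : List Int) :
    ((is.map (· + 1)).zip vs).foldl (fun g iv => g.set iv.1 iv.2) (x :: xs)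
      = x :: (is.zip vs).foldl (fun g iv => g.set iv.1 iv.2) xs := by
  induction is generalizing vs xs with
  | nil => rfl
  | cons i is ih =>
      cases vs with
      | nil => rfl
      | cons v vs' => simp [List.set, ih]

lemma zip_assign_eq_foldl_place (f : List Int) (vs : List Int)
    (h : (0 : Int) ∈ f → ∀ v ∈ vs, v ≠ 0) :
    ((zerosIdx f 0).zip vs).foldl (fun g iv => g.set iv.1 iv.2) f
      = vs.foldl placeZero f := by
  induction f generalizing vs with
  | nil => exact (foldl_placeZero_nozero vs [] (by simp)).symm
  | cons x xs ih =>
      by_cases hx : x = 0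
      · subst hx
        cases vs with
        | nil => rfl
        | cons v vs' =>
            have hv : v ≠ 0 := h (by simp) v (by simp)
            have h' : (0 : Int) ∈ xs → ∀ w ∈ vs', w ≠ 0 := by
              intro _ w hw
              exact h (by simp) w (by simp [hw])
            have hz : zerosIdx ((0 : Int) :: xs) 0 = 0 :: (zerosIdx xs 0).map (· + 1) := by
              simp [zerosIdx, zerosIdx_shift]
            rw [hz]
            have hstep : List.foldl (fun g iv => g.set iv.1 iv.2) ((0 : Int) :: xs)
                (((0 : Nat) :: (zerosIdx xs 0).map (· + 1)).zip (v :: vs'))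
                = v :: List.foldl (fun g iv => g.set iv.1 iv.2) xs ((zerosIdx xs 0).zip vs') := by
              simp only [List.zip_cons_cons, List.foldl, List.set]
              exact foldl_set_map_succ _ _ _ _
            rw [hstep, ih vs' h']
            simp [List.foldl, placeZero, foldl_placeZero_cons vs' v hv]
      · have h' : (0 : Int) ∈ xs → ∀ w ∈ vs, w ≠ 0 := by
          intro h0 w hw
          exact h (by simp [h0]) w hw
        have hz : zerosIdx (x :: xs) 0 = (zerosIdx xs 0).map (· + 1) := by
          simp [zerosIdx, hx, zerosIdx_shift]
        rw [hz, foldl_set_map_succ, ih vs h']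
        rw [foldl_placeZero_cons vs x hx]

lemma main_interleave (p : List Int) (f : List Int) (s : PySem.Set Int)
    (h2 : ∀ b ∈ f, b ∈ (s : List Int))
    (h1 : (∀ x ∈ (s : List Int), x ∈ f) ∨ (0 : Int) ∉ f) :
    p.foldl (fun g a => if a ∈ g then g else placeZero g a) f
      = (collectR s p).foldl placeZero f := by
  induction p generalizing f s with
  | nil => rfl
  | cons a p ih =>
      by_cases hc : PySem.Set.contains s a = true
      · have has : a ∈ (s : List Int) := (PySem.Set.contains_iff _ _).mp hc
        by_cases haf : a ∈ f
        · simp only [collectR, if_pos hc, List.foldl, if_pos haf]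
          exact ih f s h2 h1
        · have h0 : (0 : Int) ∉ f := by
            rcases h1 with h1 | h1
            · exact absurd (h1 a has) haf
            · exact h1
          simp only [collectR, if_pos hc, List.foldl, if_neg haf,
            placeZero_nozero f a h0]
          exact ih f s h2 h1
      · have has : a ∉ (s : List Int) := fun hm => hc ((PySem.Set.contains_iff _ _).mpr hm)
        have haf : a ∉ f := fun hm => has (h2 a hm)
        simp only [collectR, if_neg hc, List.foldl, if_neg haf]
        apply ih (placeZero f a) (PySem.Set.add s a)
        · intro b hb
          rcases mem_placeZero f a b hb with hb' | hb'
          · exact (PySem.Set.mem_add _ _ _).mpr (Or.inl (h2 b hb'))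
          · exact (PySem.Set.mem_add _ _ _).mpr (Or.inr hb')
        · by_cases h0' : (0 : Int) ∈ placeZero f a
          · left
            have h0f : (0 : Int) ∈ f := by
              by_contra h0f
              rw [placeZero_nozero f a h0f] at h0'
              exact h0f h0'
            intro x hx
            rcases (PySem.Set.mem_add _ _ _).mp hx with hx | hx
            · rcases h1 with h1 | h1
              · by_cases hxz : x = 0
                · subst hxz; exact h0'
                · exact mem_placeZero_of_ne f a x (h1 x hx) hxz
              · exact absurd h0f h1
            · exact hx ▸ self_mem_placeZero f a h0f
          · exact Or.inr h0'

-- ===== VERDICT (by name: the statement is the Claim_ definition above) =====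
theorem fillGene_spec : Claim_equal_fillGene := by
  unfold Claim_equal_fillGene Spec_fillGene
  intro f p _
  show p.foldl (fun g a => if a ∈ g then g else placeZero g a) f
      = ((zerosIdx f 0).zip
          ((p.foldl (fun sv a =>
              if PySem.Set.contains sv.1 a then sv
              else (PySem.Set.add sv.1 a, sv.2 ++ [a]))
            ((PySem.Set.ofList f : PySem.Set Int), ([] : List Int))).2)).foldl
          (fun g iv => g.set iv.1 iv.2) f
  rw [collect_bridge p (PySem.Set.ofList f) []]
  simp only [List.nil_append]
  rw [zip_assign_eq_foldl_place f (collectR (PySem.Set.ofList f) p)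
    (by
      intro h0 v hv hv0
      subst hv0
      exact collectR_not_mem p _ 0 hv ((PySem.Set.mem_ofList _ _).mpr h0))]
  exact main_interleave p f (PySem.Set.ofList f)
    (fun b hb => (PySem.Set.mem_ofList _ _).mpr hb)
    (Or.inl (fun x hx => (PySem.Set.mem_ofList _ _).mp hx))
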